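-- pv_equiv track=rewrite | github.com/BraydenParish/GM-Simulator | gm-sim/app/services/contracts.py | _allocate_guarantees
-- ===== SOURCE A (Python) =====
-- from typing import Dict, List, Optional
--
-- def _allocate_guarantees(
--     base_salary: "OrderedDict[int, int]", guarantees_total: int
-- ) -> Dict[int, int]:
--     allocation: Dict[int, int] = {}
--     remaining = max(0, guarantees_total)
--     for year, salary in base_salary.items():
--         if remaining <= 0:
--             allocation[year] = 0
--             continue
--         guaranteed = min(salary, remaining)
--         allocation[year] = guaranteed
--         remaining -= guaranteed
--     if remaining > 0 and base_salary:
--         first_year = next(iter(base_salary))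
--         allocation[first_year] = allocation.get(first_year, 0) + remaining
--     return allocation
-- ===== SOURCE B (Python) =====
-- from typing import Dict, List, Optional, Tuple
--
--
-- def _prefix_sums(salaries: List[int]) -> List[int]:
--     # prefix[i] = sum of the first i salaries
--     prefix = [0]
--     for s in salaries:
--         prefix.append(prefix[-1] + s)
--     return prefix
--
--
-- def _values_and_leftover(salaries: List[int], total: int) -> Tuple[List[int], int]:
--     n = len(salaries)
--     prefix = _prefix_sums(salaries)
--     if total == 0:
--         return [0] * n, 0
--     # first year whose cumulative salary reaches the guarantee total
--     k = next((i for i in range(n) if prefix[i + 1] >= total), n)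
--     if k == n:
--         return list(salaries), total - prefix[n]
--     return salaries[:k] + [total - prefix[k]] + [0] * (n - k - 1), 0
--
--
-- def _allocate_guarantees(
--     base_salary: "OrderedDict[int, int]", guarantees_total: int
-- ) -> Dict[int, int]:
--     years = list(base_salary)
--     salaries = list(base_salary.values())
--     values, leftover = _values_and_leftover(salaries, max(0, guarantees_total))
--     allocation = dict(zip(years, values))
--     if leftover > 0 and years:
--         allocation[years[0]] = allocation.get(years[0], 0) + leftover
--     return allocation
-- ===== Notes on version B (the rewrite author's own statement) =====
-- stated objective: alternative
-- what changed: Replaces A's stateful loop that decrements a `remaining` counter per year with a closed-form construction: compute prefix sums of the salaries once, locate the single cutoff year whose cumulative salary reaches the guarantee total, and build the allocation list as full-salaries-before-cutoff ++ [residual at cutoff] ++ zeros-after, then dict(zip(years, values)).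
import Mathlib
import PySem

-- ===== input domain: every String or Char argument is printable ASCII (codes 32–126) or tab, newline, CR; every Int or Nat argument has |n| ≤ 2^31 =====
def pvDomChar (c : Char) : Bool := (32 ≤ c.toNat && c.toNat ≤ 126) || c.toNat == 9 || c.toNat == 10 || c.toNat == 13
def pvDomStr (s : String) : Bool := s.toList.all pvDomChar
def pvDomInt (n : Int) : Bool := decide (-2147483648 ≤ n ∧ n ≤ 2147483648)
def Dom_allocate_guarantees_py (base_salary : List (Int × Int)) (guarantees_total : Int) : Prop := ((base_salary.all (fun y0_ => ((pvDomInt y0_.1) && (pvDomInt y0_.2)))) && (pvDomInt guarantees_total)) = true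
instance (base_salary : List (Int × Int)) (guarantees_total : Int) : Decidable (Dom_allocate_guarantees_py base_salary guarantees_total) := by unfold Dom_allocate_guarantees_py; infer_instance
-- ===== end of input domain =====

-- B replaces A's stateful decrementing-`remaining` loop by prefix sums and a cutoff index
-- (allocations are read off the prefix-sum list); objective: alternative decomposition, same O(n) cost.

-- ===== PORT A =====
-- literal transliteration of _allocate_guarantees: dict + decrementing `remaining` loop,
-- then the first-year surplus dump.
def allocate_guarantees_py (base_salary : List (Int × Int)) (guarantees_total : Int) : List (Int × Int) :=
  let st :=
    base_salary.foldl
      (fun (st : PySem.Dict Int Int × Int) p =>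
        if st.2 ≤ 0 then (st.1.insert p.1 0, st.2)
        else
          let guaranteed := min p.2 st.2
          (st.1.insert p.1 guaranteed, st.2 - guaranteed))
      (PySem.Dict.empty, max 0 guarantees_total)
  let alloc := st.1
  let remaining := st.2
  if 0 < remaining then
    match base_salary with
    | [] => alloc.items
    | (first_year, _) :: _ =>
        (alloc.insert first_year (alloc.getD first_year 0 + remaining)).items
  else alloc.items

-- ===== PORT B =====
-- literal transliteration of Source B: prefix-sum list, cutoff index k, slice-built value list,
-- dict(zip(years, values)), then the leftover dump. prefix[i+1]/prefix[k]/prefix[n] are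
-- nonnegative in-range indices, ported as List.getD; prefix[-1] uses PySem.List.pyGetD.
def pvPrefixSums (salaries : List Int) : List Int :=
  salaries.foldl (fun pr s => pr ++ [PySem.List.pyGetD pr (-1) 0 + s]) [0]

def pvValuesAndLeftover (salaries : List Int) (total : Int) : List Int × Int :=
  let n := salaries.length
  let pre := pvPrefixSums salaries
  if total = 0 then (List.replicate n (0 : Int), (0 : Int))
  else
    let k := ((List.range n).find? (fun i => decide (total ≤ pre.getD (i + 1) 0))).getD n
    if k = n then (salaries, total - pre.getD n 0)
    else (salaries.take k ++ [total - pre.getD k 0] ++ List.replicate (n - k - 1) 0, (0 : Int))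

def allocate_guarantees_py_alt (base_salary : List (Int × Int)) (guarantees_total : Int) : List (Int × Int) :=
  let years := base_salary.map Prod.fst
  let salaries := base_salary.map Prod.snd
  let vl := pvValuesAndLeftover salaries (max 0 guarantees_total)
  let values := vl.1
  let leftover := vl.2
  let allocation :=
    (years.zip values).foldl (fun (d : PySem.Dict Int Int) p => d.insert p.1 p.2) PySem.Dict.empty
  if 0 < leftover then
    match years with
    | [] => allocation.items
    | y0 :: _ => (allocation.insert y0 (allocation.getD y0 0 + leftover)).items
  else allocation.items

-- ===== PRECONDITION & SPEC =====
def Spec_allocate_guarantees_py (base_salary : List (Int × Int)) (guarantees_total : Int) (out : List (Int × Int)) : Prop := out = allocate_guarantees_py_alt base_salary guarantees_total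
instance (base_salary : List (Int × Int)) (guarantees_total : Int) (out : List (Int × Int)) : Decidable (Spec_allocate_guarantees_py base_salary guarantees_total out) := by unfold Spec_allocate_guarantees_py; infer_instance

-- ===== CLAIM (what is proved, stated in full; the proofs are below) =====
def Claim_equal_allocate_guarantees_py : Prop := ∀ (base_salary : List (Int × Int)) (guarantees_total : Int), Dom_allocate_guarantees_py base_salary guarantees_total → Spec_allocate_guarantees_py base_salary guarantees_total (allocate_guarantees_py base_salary guarantees_total)

-- ===== LEMMAS AND PROOFS =====

def pvScan (a : Int) : List Int → List Int
  | [] => []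
  | s :: t => (a + s) :: pvScan (a + s) t

theorem prefix_eq (l : List Int) : ∀ (acc : List Int) (x : Int),
    (h : acc ≠ []) → acc.getLast h = x →
    l.foldl (fun pr s => pr ++ [PySem.List.pyGetD pr (-1) 0 + s]) acc = acc ++ pvScan x l := by
  induction l with
  | nil => intro acc x h hx; simp [pvScan]
  | cons s t ih =>
    intro acc x h hx
    simp only [List.foldl_cons]
    rw [PySem.List.pyGetD_neg_one acc 0 h, hx]
    rw [ih (acc ++ [x + s]) (x + s) (by simp) (by simp)]
    simp [pvScan]

def pvVals (r : Int) : List Int → List Int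
  | [] => []
  | s :: t => if r ≤ 0 then 0 :: pvVals r t else min s r :: pvVals (r - min s r) t

def pvRem (r : Int) : List Int → Int
  | [] => r
  | s :: t => if r ≤ 0 then pvRem r t else pvRem (r - min s r) t

theorem A_fold (l : List (Int × Int)) : ∀ (d : PySem.Dict Int Int) (r : Int),
    l.foldl
      (fun (st : PySem.Dict Int Int × Int) p =>
        if st.2 ≤ 0 then (st.1.insert p.1 0, st.2)
        else
          let guaranteed := min p.2 st.2
          (st.1.insert p.1 guaranteed, st.2 - guaranteed)) (d, r)
    = (((l.map Prod.fst).zip (pvVals r (l.map Prod.snd))).foldl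
         (fun (d : PySem.Dict Int Int) p => d.insert p.1 p.2) d,
       pvRem r (l.map Prod.snd)) := by
  induction l with
  | nil => intro d r; simp [pvVals, pvRem]
  | cons p t ih =>
    intro d r
    by_cases hr : r ≤ 0
    · simp [pvVals, pvRem, hr, ih]
    · simp [pvVals, pvRem, hr, ih]

theorem pvScan_getD_shift (l : List Int) : ∀ (a : Int) (i : Nat), i < l.length →
    (pvScan a l).getD i 0 = a + (pvScan 0 l).getD i 0 := by
  induction l with
  | nil => intro a i h; simp at h
  | cons s t ih =>
    intro a i h
    cases i with
    | zero => simp [pvScan]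
    | succ j =>
      simp only [pvScan, List.getD_cons_succ]
      rw [ih (a + s) j (by simpa using h), ih (0 + s) j (by simpa using h)]
      ring

theorem pvPrefix_succ (s : Int) (t : List Int) (j : Nat) (hj : j ≤ t.length) :
    (0 :: pvScan 0 (s :: t)).getD (j + 1) 0 = s + (0 :: pvScan 0 t).getD j 0 := by
  cases j with
  | zero => simp [pvScan]
  | succ i =>
    have hi : i < t.length := by omega
    simp only [pvScan, List.getD_cons_succ]
    rw [pvScan_getD_shift t (0 + s) i hi]
    ring

theorem pvVals_nonpos (r : Int) (h : r ≤ 0) : ∀ l, pvVals r l = List.replicate l.length 0 := by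
  intro l; induction l with
  | nil => rfl
  | cons s t ih => simp [pvVals, h, ih, List.replicate]

theorem pvRem_nonpos (r : Int) (h : r ≤ 0) : ∀ l, pvRem r l = r := by
  intro l; induction l with
  | nil => rfl
  | cons s t ih => simp [pvRem, h, ih]

theorem pvFind_congr {l : List Nat} {p q : Nat → Bool} (h : ∀ x ∈ l, p x = q x) :
    l.find? p = l.find? q := by
  induction l with
  | nil => rfl
  | cons a t ih =>
    have ha := h a (by simp)
    by_cases hp : p a = true
    · rw [List.find?_cons_of_pos hp, List.find?_cons_of_pos (by rw [← ha]; exact hp)]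
    · rw [List.find?_cons_of_neg (by simpa using hp),
        List.find?_cons_of_neg (by simp [← ha]; simpa using hp)]
      exact ih (fun x hx => h x (by simp [hx]))

theorem B_core : ∀ (l : List Int) (T : Int), 0 < T →
    (let k := ((List.range l.length).find? (fun i => decide (T ≤ (0 :: pvScan 0 l).getD (i + 1) 0))).getD l.length
     if k = l.length then (l, T - (0 :: pvScan 0 l).getD l.length 0)
     else (l.take k ++ [T - (0 :: pvScan 0 l).getD k 0] ++ List.replicate (l.length - k - 1) 0, (0 : Int)))
    = (pvVals T l, pvRem T l) := by
  intro l
  induction l with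
  | nil => intro T hT; simp [pvVals, pvRem]
  | cons s t ih =>
    intro T hT
    simp only []
    by_cases h1 : T ≤ s
    · -- cutoff at the head
      have hfind : ((List.range (s :: t).length).find?
          (fun i => decide (T ≤ (0 :: pvScan 0 (s :: t)).getD (i + 1) 0))) = some 0 := by
        have : (s :: t).length = t.length + 1 := rfl
        rw [this, List.range_succ_eq_map]
        apply List.find?_cons_of_pos
        simpa [pvScan] using h1
      rw [hfind]
      have hmin : min s T = T := by omega
      simp [pvVals, pvRem, hmin, pvScan, show ¬ T ≤ 0 by omega,
        pvVals_nonpos 0 (le_refl 0) t, pvRem_nonpos 0 (le_refl 0) t]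
    · -- head absorbed, recurse on the tail with T - s
      have hs : s < T := by omega
      have hshift : ∀ j ≤ t.length,
          (0 :: pvScan 0 (s :: t)).getD (j + 1) 0 = s + (0 :: pvScan 0 t).getD j 0 :=
        fun j hj => pvPrefix_succ s t j hj
      have hfind : ((List.range (s :: t).length).find?
            (fun i => decide (T ≤ (0 :: pvScan 0 (s :: t)).getD (i + 1) 0)))
          = (((List.range t.length).find?
              (fun i => decide (T - s ≤ (0 :: pvScan 0 t).getD (i + 1) 0))).map Nat.succ) := by
        have : (s :: t).length = t.length + 1 := rfl
        rw [this, List.range_succ_eq_map]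
        rw [List.find?_cons_of_neg (by simpa [pvScan] using h1)]
        rw [List.find?_map]
        congr 1
        apply pvFind_congr
        intro x hx
        have hx' : x < t.length := List.mem_range.mp hx
        simp only [Function.comp]
        rw [show (Nat.succ x) + 1 = (x + 1) + 1 from rfl, hshift (x + 1) (by omega)]
        simp only [decide_eq_decide]
        omega
      rw [hfind]
      have ihs := ih (T - s) (by omega)
      have hvals : pvVals T (s :: t) = s :: pvVals (T - s) t := by
        simp [pvVals, show ¬ T ≤ 0 by omega, show min s T = s by omega]
      have hrem : pvRem T (s :: t) = pvRem (T - s) t := by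
        simp [pvRem, show ¬ T ≤ 0 by omega, show min s T = s by omega]
      rw [hvals, hrem]
      cases hf : ((List.range t.length).find?
          (fun i => decide (T - s ≤ (0 :: pvScan 0 t).getD (i + 1) 0))) with
      | none =>
        rw [hf] at ihs
        simp only [Option.map_none, Option.getD_none] at ihs ⊢
        simp only [if_true] at ihs ⊢
        have h1' : t = pvVals (T - s) t := congrArg Prod.fst ihs
        have h2' : T - s - (0 :: pvScan 0 t).getD t.length 0 = pvRem (T - s) t :=
          congrArg Prod.snd ihs
        have hlast : (0 :: pvScan 0 (s :: t)).getD (s :: t).length 0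
            = s + (0 :: pvScan 0 t).getD t.length 0 := hshift t.length (le_refl _)
        rw [hlast, ← h1', ← h2']
        have : T - (s + (0 :: pvScan 0 t).getD t.length 0)
            = T - s - (0 :: pvScan 0 t).getD t.length 0 := by ring
        rw [this]
      | some j =>
        rw [hf] at ihs
        have hjlt : j < t.length := List.mem_range.mp (List.mem_of_find?_eq_some hf)
        simp only [Option.map_some, Option.getD_some] at ihs ⊢
        rw [if_neg (by omega)] at ihs
        rw [if_neg (by simp only [List.length_cons]; omega)]
        have h1' : t.take j ++ [T - s - (0 :: pvScan 0 t).getD j 0]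
            ++ List.replicate (t.length - j - 1) 0 = pvVals (T - s) t := congrArg Prod.fst ihs
        have h2' : (0 : Int) = pvRem (T - s) t := congrArg Prod.snd ihs
        rw [← h1', ← h2']
        have hget : (0 :: pvScan 0 (s :: t)).getD (j + 1) 0 = s + (0 :: pvScan 0 t).getD j 0 :=
          hshift j (by omega)
        rw [Prod.mk.injEq]
        refine ⟨?_, rfl⟩
        rw [List.take_succ_cons, hget]
        have : T - (s + (0 :: pvScan 0 t).getD j 0) = T - s - (0 :: pvScan 0 t).getD j 0 := by ring
        rw [this]
        simp only [List.length_cons, List.cons_append]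
        have hcnt : t.length + 1 - (j + 1) - 1 = t.length - j - 1 := by omega
        rw [hcnt]


-- both ports compute pvOut
def pvOut (bs : List (Int × Int)) (T : Int) : List (Int × Int) :=
  let alloc := ((bs.map Prod.fst).zip (pvVals T (bs.map Prod.snd))).foldl
    (fun (d : PySem.Dict Int Int) p => d.insert p.1 p.2) PySem.Dict.empty
  let r := pvRem T (bs.map Prod.snd)
  if 0 < r then
    match bs.map Prod.fst with
    | [] => alloc.items
    | y0 :: _ => (alloc.insert y0 (alloc.getD y0 0 + r)).items
  else alloc.items

theorem hA (bs : List (Int × Int)) (g : Int) :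
    allocate_guarantees_py bs g = pvOut bs (max 0 g) := by
  simp only [allocate_guarantees_py, pvOut]
  rw [A_fold bs PySem.Dict.empty (max 0 g)]
  cases bs with
  | nil => rfl
  | cons p t => rfl

theorem pvVL_eq (salaries : List Int) (total : Int) (h : 0 ≤ total) :
    pvValuesAndLeftover salaries total = (pvVals total salaries, pvRem total salaries) := by
  have hpre : pvPrefixSums salaries = 0 :: pvScan 0 salaries := by
    unfold pvPrefixSums
    rw [prefix_eq salaries [0] 0 (by simp) rfl]
    simp
  by_cases h0 : total = 0
  · subst h0
    simp only [pvValuesAndLeftover, if_true,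
      pvVals_nonpos 0 (le_refl 0), pvRem_nonpos 0 (le_refl 0)]
  · have hpos : 0 < total := by omega
    simp only [pvValuesAndLeftover, hpre, if_neg h0]
    exact B_core salaries total hpos

theorem hB (bs : List (Int × Int)) (g : Int) :
    allocate_guarantees_py_alt bs g = pvOut bs (max 0 g) := by
  simp only [allocate_guarantees_py_alt, pvOut,
    pvVL_eq (bs.map Prod.snd) (max 0 g) (le_max_left 0 g)]

-- ===== VERDICT (by name: the statement is the Claim_ definition above) =====
theorem allocate_guarantees_py_spec : Claim_equal_allocate_guarantees_py := by
  intro bs g _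
  unfold Spec_allocate_guarantees_py
  rw [hA, hB]
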